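-- pv_equiv track=rewrite | github.com/zero0205/Algorithm_Python | 코테/2023 하반기 SKT/2.py | solution
-- ===== SOURCE A (Python) =====
-- def solution(n, m, send, errorlog):
--     answer =[]
--     for mail_send in send:
--         server_receive = mail_send + n
--         server_send = server_receive + m
--         fail = False
--         # 에러
--         for error, sec in errorlog:
--             if sec < server_receive:
--                 continue
--             if sec > server_send:
--                 break
--             if error == 1:  # 전송 실패
--                 if server_receive <= sec < server_send:
--                     fail = True
--                     break
--             if error == 2: # 전송 지연
--                 if server_receive <= sec < server_send:
--                     remain = (server_send - sec)
--                     server_send += remain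
--         answer.append(server_send+n if not fail else -1)
--     return answer
-- ===== SOURCE B (Python) =====
-- def solution(n, m, send, errorlog):
--     # Fold the whole error log through an explicit three-state automaton
--     # (run / done / fail) instead of an early-breaking continue/break scan.
--     def step(receive, state, ev):
--         tag, t = state
--         if tag != 'run':
--             return state
--         err, sec = ev
--         if sec < receive:
--             return ('run', t)
--         if sec > t:
--             return ('done', t)
--         if err == 1 and sec < t:
--             return ('fail', t)
--         if err == 2 and sec < t:
--             return ('run', 2 * t - sec)
--         return ('run', t)
--
--     def deliver(receive):
--         state = ('run', receive + m)
--         for ev in errorlog: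
--             state = step(receive, state, ev)
--         tag, t = state
--         return -1 if tag == 'fail' else t + n
--
--     return [deliver(s + n) for s in send]
-- ===== Notes on version B (the rewrite author's own statement) =====
-- stated objective: alternative
-- what changed: B replaces A's early-breaking continue/break scan with a total fold of the whole error log through an explicit three-state automaton (run/done/fail) with a pure transition function, and builds the answer as a comprehension over send instead of A's in-loop mutation and append.
import Mathlib
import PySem

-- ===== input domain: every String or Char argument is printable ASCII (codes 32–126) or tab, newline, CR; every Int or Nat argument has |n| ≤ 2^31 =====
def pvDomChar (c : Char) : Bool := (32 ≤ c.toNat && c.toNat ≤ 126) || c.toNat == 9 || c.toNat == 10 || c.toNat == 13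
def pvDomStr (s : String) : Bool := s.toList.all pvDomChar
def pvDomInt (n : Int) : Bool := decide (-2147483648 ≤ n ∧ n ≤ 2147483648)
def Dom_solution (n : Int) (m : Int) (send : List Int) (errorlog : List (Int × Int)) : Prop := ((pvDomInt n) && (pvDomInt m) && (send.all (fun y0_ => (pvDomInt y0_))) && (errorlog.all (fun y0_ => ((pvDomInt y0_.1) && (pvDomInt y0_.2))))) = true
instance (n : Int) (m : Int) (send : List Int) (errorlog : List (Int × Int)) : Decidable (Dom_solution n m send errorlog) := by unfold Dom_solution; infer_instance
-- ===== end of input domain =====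

-- B folds the whole error log through an explicit three-state automaton (run/done/fail)
-- with a pure transition function instead of A's early-breaking continue/break scan
-- (objective: alternative; same cost).

-- ===== PORT A =====
-- inner 'for error, sec in errorlog' loop of A, state = server_send; returns (server_send, fail)
def aInner (recv : Int) : List (Int × Int) → Int → Int × Bool
  | [], t => (t, false)
  | (err, sec) :: rest, t =>
    if sec < recv then aInner recv rest t
    else if sec > t then (t, false)
    else if err = 1 ∧ recv ≤ sec ∧ sec < t then (t, true)
    else if err = 2 ∧ recv ≤ sec ∧ sec < t then aInner recv rest (t + (t - sec))
    else aInner recv rest t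

def solution (n : Int) (m : Int) (send : List Int) (errorlog : List (Int × Int)) : List Int :=
  send.foldl (fun answer mail_send =>
    let server_receive := mail_send + n
    let p := aInner server_receive errorlog (server_receive + m)
    answer ++ [if p.2 = false then p.1 + n else -1]) []

-- ===== PORT B =====
-- automaton state: still running with send time t / stopped with t / failed (t kept as in Source B)
inductive MState where
  | run  : Int → MState
  | done : Int → MState
  | fail : Int → MState
deriving DecidableEq, Repr

-- Source B's 'step': pure transition on one log entry
def bStep (receive : Int) (st : MState) (ev : Int × Int) : MState :=
  match st with
  | .done t => .done t
  | .fail t => .fail t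
  | .run t =>
    if ev.2 < receive then .run t
    else if ev.2 > t then .done t
    else if ev.1 = 1 ∧ ev.2 < t then .fail t
    else if ev.1 = 2 ∧ ev.2 < t then .run (2 * t - ev.2)
    else .run t

-- Source B's 'deliver': fold the whole log, then read the final state off
def bDeliver (n m : Int) (errorlog : List (Int × Int)) (receive : Int) : Int :=
  match errorlog.foldl (bStep receive) (.run (receive + m)) with
  | .fail _ => -1
  | .run t => t + n
  | .done t => t + n

def solution_alt (n : Int) (m : Int) (send : List Int) (errorlog : List (Int × Int)) : List Int :=
  send.map (fun s => bDeliver n m errorlog (s + n))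

-- ===== PRECONDITION & SPEC =====
def Spec_solution (n : Int) (m : Int) (send : List Int) (errorlog : List (Int × Int)) (out : List Int) : Prop := out = solution_alt n m send errorlog
instance (n : Int) (m : Int) (send : List Int) (errorlog : List (Int × Int)) (out : List Int) : Decidable (Spec_solution n m send errorlog out) := by unfold Spec_solution; infer_instance

-- ===== CLAIM (what is proved, stated in full; the proofs are below) =====
def Claim_equal_solution : Prop := ∀ (n : Int) (m : Int) (send : List Int) (errorlog : List (Int × Int)), Dom_solution n m send errorlog → Spec_solution n m send errorlog (solution n m send errorlog)

-- ===== LEMMAS AND PROOFS =====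

-- done and fail are absorbing for the fold
theorem foldl_bStep_done (recv t : Int) (errs : List (Int × Int)) :
    errs.foldl (bStep recv) (.done t) = MState.done t := by
  induction errs with
  | nil => rfl
  | cons e rest ih => simpa [bStep] using ih

theorem foldl_bStep_fail (recv t : Int) (errs : List (Int × Int)) :
    errs.foldl (bStep recv) (.fail t) = MState.fail t := by
  induction errs with
  | nil => rfl
  | cons e rest ih => simpa [bStep] using ih

-- A's early-breaking scan equals reading off B's automaton fold
theorem aInner_eq_fold (recv : Int) (errs : List (Int × Int)) (t : Int) :
    aInner recv errs t =
      (match errs.foldl (bStep recv) (MState.run t) with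
       | .run t' => (t', false)
       | .done t' => (t', false)
       | .fail tf => (tf, true)) := by
  induction errs generalizing t with
  | nil => rfl
  | cons e rest ih =>
    obtain ⟨err, sec⟩ := e
    simp only [aInner, List.foldl_cons]
    by_cases h1 : sec < recv
    · simp [bStep, h1, ih]
    · by_cases h2 : sec > t
      · simp [bStep, h1, h2, foldl_bStep_done]
      · by_cases hf : err = 1 ∧ recv ≤ sec ∧ sec < t
        · have hf' : err = 1 ∧ sec < t := ⟨hf.1, hf.2.2⟩
          simp [bStep, h1, h2, hf, foldl_bStep_fail]
        · by_cases hd : err = 2 ∧ recv ≤ sec ∧ sec < t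
          · have hd' : err = 2 ∧ sec < t := ⟨hd.1, hd.2.2⟩
            have hf' : ¬ (err = 1 ∧ sec < t) := by
              rintro ⟨he, hs⟩; exact hf ⟨he, by omega, hs⟩
            have ht : t + (t - sec) = 2 * t - sec := by ring
            simp [bStep, h1, h2, hd, ht, ih]
          · have hf' : ¬ (err = 1 ∧ sec < t) := by
              rintro ⟨he, hs⟩; exact hf ⟨he, by omega, hs⟩
            have hd' : ¬ (err = 2 ∧ sec < t) := by
              rintro ⟨he, hs⟩; exact hd ⟨he, by omega, hs⟩
            simp [bStep, h1, h2, hf, hf', hd, hd', ih]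

-- ===== VERDICT (by name: the statement is the Claim_ definition above) =====
theorem solution_spec : Claim_equal_solution := by
  intro n m send errorlog _
  unfold Spec_solution solution solution_alt
  rw [PySem.List.foldl_append_singleton_eq_map]
  refine List.map_congr_left ?_
  intro s _
  simp only [aInner_eq_fold, bDeliver]
  cases errorlog.foldl (bStep (s + n)) (.run (s + n + m)) <;> rfl
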